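-- pv_equiv track=rewrite | github.com/GitofHJH/Programmers-with-Python | Level_1/과일 장수.py | solution
-- ===== SOURCE A (Python) =====
-- from collections import deque
--
-- def solution(k, m, score):
--     answer = 0
--     score = sorted(score)
--     q = deque(score)
--     while len(q) >= m:
--         box = []
--         for _ in range(m):
--             box.append(q.pop())
--         answer += min(box) * m
--     return answer
-- ===== SOURCE B (Python) =====
-- def solution(k, m, score):
--     s = sorted(score, reverse=True)
--     answer = 0
--     for i in range(m - 1, len(s), m):
--         answer += s[i] * m
--     return answer
-- ===== Notes on version B (the rewrite author's own statement) =====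
-- stated objective: simpler
-- what changed: Replaces the deque, the inner m-pop box loop and the per-box min() with a single strided index pass over the descending-sorted list, reading each group's minimum directly at index m-1, 2m-1, ...
import Mathlib
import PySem

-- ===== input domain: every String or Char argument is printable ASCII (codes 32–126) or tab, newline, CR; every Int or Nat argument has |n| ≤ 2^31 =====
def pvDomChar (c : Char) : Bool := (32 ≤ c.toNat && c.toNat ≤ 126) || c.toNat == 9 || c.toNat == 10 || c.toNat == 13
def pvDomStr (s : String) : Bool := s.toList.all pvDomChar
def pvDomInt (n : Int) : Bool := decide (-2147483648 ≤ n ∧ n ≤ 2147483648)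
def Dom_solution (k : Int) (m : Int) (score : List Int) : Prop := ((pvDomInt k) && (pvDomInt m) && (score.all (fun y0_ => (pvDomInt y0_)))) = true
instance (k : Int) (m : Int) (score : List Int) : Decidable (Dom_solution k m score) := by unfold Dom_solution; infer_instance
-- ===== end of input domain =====

-- B replaces A's deque-popping loop and per-box min() with one strided pass over the
-- descending-sorted list (objective: simpler decomposition, same asymptotic cost).

-- ===== PORT A =====
-- inner loop 'for _ in range(m): box.append(q.pop())' (pops from the right end)
def popBox : Nat → List Int → List Int → List Int × List Int
  | 0, box, q => (box, q)
  | n+1, box, q => popBox n (box ++ [q.getLast?.getD 0]) q.dropLast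

theorem popBox_snd_length (n : Nat) : ∀ (box q : List Int), (popBox n box q).2.length = q.length - n := by
  induction n with
  | zero => intro box q; simp [popBox]
  | succ n ih =>
    intro box q
    show (popBox n _ q.dropLast).2.length = _
    rw [ih]
    simp only [List.length_dropLast]
    omega

-- 'while len(q) >= m: …'; the '0 < m' conjunct only makes the recursion total (on m ≤ 0
-- Python raises ValueError in min([]), excluded by Pre_solution)
def solutionLoop (m : Int) (q : List Int) (answer : Int) : Int :=
  if h : 0 < m ∧ m ≤ (q.length : Int) then
    solutionLoop m (popBox m.toNat [] q).2
      (answer + (PySem.List.min? (popBox m.toNat [] q).1 (fun x => x)).getD 0 * m)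
  else answer
termination_by q.length
decreasing_by
  have hl := popBox_snd_length m.toNat [] q
  omega

def solution (k : Int) (m : Int) (score : List Int) : Int :=
  solutionLoop m (PySem.List.sorted score (fun x => x) false) 0

-- ===== PORT B =====
def solution_alt (k : Int) (m : Int) (score : List Int) : Int :=
  let s := PySem.List.sorted score (fun x => x) true
  (PySem.List.pyRange (m - 1) (s.length : Int) m).foldl
    (fun answer i => answer + PySem.List.pyGetD s i 0 * m) 0

-- ===== PRECONDITION & SPEC =====
-- Pre_ excludes m ≤ 0, where Python A raises ValueError (min() of the empty box).
def Pre_solution (k : Int) (m : Int) (score : List Int) : Prop := 1 ≤ m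
instance (k : Int) (m : Int) (score : List Int) : Decidable (Pre_solution k m score) := by unfold Pre_solution; infer_instance
def pvWitness_solution : Int × Int × List Int := (0, 2, [1, 2, 3])
def Spec_solution (k : Int) (m : Int) (score : List Int) (out : Int) : Prop := out = solution_alt k m score
instance (k : Int) (m : Int) (score : List Int) (out : Int) : Decidable (Spec_solution k m score out) := by unfold Spec_solution; infer_instance

-- ===== CLAIM (what is proved, stated in full; the proofs are below) =====
def Claim_equal_solution : Prop := ∀ (k : Int) (m : Int) (score : List Int), Dom_solution k m score → Pre_solution k m score → Spec_solution k m score (solution k m score)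

-- ===== LEMMAS AND PROOFS =====

-- common value of both programs: m times the sum of the group minima, read off the
-- reverse of the ascending-sorted list at indices m-1, 2m-1, …
def groupSum (m : Int) (q : List Int) : Int :=
  ((List.range (((q.length : Int) / m).toNat)).map
    (fun (k : Nat) => PySem.List.pyGetD q.reverse (m - 1 + m * (k : Int)) 0 * m)).sum

theorem pyGetD_drop_int (xs : List Int) (a : Nat) (i : Int) (hi : 0 ≤ i) (d : Int) :
    PySem.List.pyGetD (xs.drop a) i d = PySem.List.pyGetD xs ((a : Int) + i) d := by
  rw [PySem.List.pyGetD_of_nonneg _ _ hi, PySem.List.pyGetD_of_nonneg _ _ (by omega)]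
  rw [List.getD_eq_getElem?_getD, List.getD_eq_getElem?_getD, List.getElem?_drop]
  have hidx : ((a : Int) + i).toNat = a + i.toNat := by omega
  rw [hidx]

theorem popBox_eq (n : Nat) : ∀ (box q : List Int), n ≤ q.length →
    popBox n box q = (box ++ (q.drop (q.length - n)).reverse, q.take (q.length - n)) := by
  induction n with
  | zero => intro box q _; simp [popBox]
  | succ n ih =>
    intro box q h
    obtain ⟨ys, y, rfl⟩ : ∃ ys y, q = ys ++ [y] := by
      have hq : q ≠ [] := by intro h0; rw [h0] at h; simp at h
      obtain ⟨ys, y, h'⟩ := (List.eq_nil_or_concat q).resolve_left hq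
      exact ⟨ys, y, by simpa using h'⟩
    show popBox n (box ++ [((ys ++ [y]).getLast?).getD 0]) (ys ++ [y]).dropLast = _
    rw [List.getLast?_concat, List.dropLast_concat]
    have hn : n ≤ ys.length := by simp at h; omega
    rw [ih _ ys hn]
    have h1 : (ys ++ [y]).length - (n + 1) = ys.length - n := by simp
    have h2 : ys.length - n ≤ ys.length := by omega
    rw [h1, List.drop_append_of_le_length h2, List.take_append_of_le_length h2]
    simp

theorem min_box (q : List Int) (hp : q.Pairwise (· ≤ ·)) (j : Nat) (hj : j < q.length) :
    (PySem.List.min? ((q.drop j).reverse) (fun x => x)).getD 0 = q[j] := by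
  have hdrop := List.drop_eq_getElem_cons hj
  cases hmin : PySem.List.min? ((q.drop j).reverse) (fun x => x) with
  | none =>
    rw [PySem.List.min?_eq_none_iff, List.reverse_eq_nil_iff] at hmin
    rw [hdrop] at hmin
    exact absurd hmin (List.cons_ne_nil _ _)
  | some v =>
    have hvmem : v ∈ (q.drop j).reverse := PySem.List.min?_mem hmin
    rw [List.mem_reverse, hdrop] at hvmem
    have hqj_mem : q[j] ∈ (q.drop j).reverse := by
      rw [List.mem_reverse, hdrop]; exact List.mem_cons_self
    have h1 : v ≤ q[j] := PySem.List.min?_isMin hmin _ hqj_mem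
    have hpd : (q.drop j).Pairwise (fun a b : Int => a ≤ b) := hp.drop
    rw [hdrop] at hpd
    rw [List.mem_cons] at hvmem
    have h2 : q[j] ≤ v := by
      rcases hvmem with rfl | hv
      · exact le_refl _
      · exact (List.pairwise_cons.mp hpd).1 v hv
    have : v = q[j] := le_antisymm h1 h2
    simp [this]

theorem groupSum_step (m : Int) (hm : 1 ≤ m) (q : List Int) (hlen : m ≤ (q.length : Int)) :
    groupSum m q =
      PySem.List.pyGetD q.reverse (m - 1) 0 * m + groupSum m (q.take (q.length - m.toNat)) := by
  unfold groupSum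
  have hnn : (0:Int) ≤ ((q.length : Int) - m) / m := Int.ediv_nonneg (by omega) (by omega)
  have hcnt : (((q.length : Int)) / m).toNat
      = (((((q.take (q.length - m.toNat)).length : Int)) / m).toNat) + 1 := by
    have hdiv : ((q.length : Int)) / m = ((q.length : Int) - m) / m + 1 := by
      conv_lhs => rw [show ((q.length : Int)) = ((q.length : Int) - m) + 1 * m by ring]
      rw [Int.add_mul_ediv_right _ _ (by omega)]
    have htk : (((q.take (q.length - m.toNat)).length : Int)) = (q.length : Int) - m := by
      rw [List.length_take]; push_cast; omega
    rw [htk, hdiv]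
    omega
  rw [hcnt, List.range_succ_eq_map]
  simp only [List.map_cons, List.sum_cons, List.map_map]
  congr 1
  · norm_num
  · apply congrArg List.sum
    apply List.map_congr_left
    intro k _
    simp only [Function.comp_apply]
    have hrt : (q.take (q.length - m.toNat)).reverse
        = q.reverse.drop (q.length - (q.length - m.toNat)) := List.reverse_take
    have hmm : q.length - (q.length - m.toNat) = m.toNat := by omega
    rw [hrt, hmm]
    have hk0 : (0:Int) ≤ m * (k : Int) := mul_nonneg (by omega) (Int.natCast_nonneg k)
    rw [pyGetD_drop_int _ _ _ (by omega) _]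
    congr 2
    have : ((m.toNat : Int)) = m := Int.toNat_of_nonneg (by omega)
    rw [this]
    push_cast
    ring

theorem loop_eq (m : Int) (hm : 1 ≤ m) :
    ∀ (N : Nat) (q : List Int), q.length ≤ N → q.Pairwise (· ≤ ·) → ∀ ans,
      solutionLoop m q ans = ans + groupSum m q := by
  intro N
  induction N with
  | zero =>
    intro q hN _ ans
    have hq : q = [] := List.eq_nil_of_length_eq_zero (by omega)
    subst hq
    rw [solutionLoop, dif_neg (by simp)]
    simp [groupSum]
  | succ N ih =>
    intro q hN hp ans
    rw [solutionLoop]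
    by_cases h : 0 < m ∧ m ≤ (q.length : Int)
    · rw [dif_pos h]
      have hjlt : q.length - m.toNat < q.length := by omega
      rw [popBox_eq m.toNat [] q (by omega)]
      simp only [List.nil_append]
      rw [min_box q hp _ hjlt]
      rw [ih (q.take (q.length - m.toNat)) (by simp; omega) (hp.take) _]
      rw [groupSum_step m hm q h.2]
      have hgd : PySem.List.pyGetD q.reverse (m - 1) 0 = q[q.length - m.toNat] := by
        rw [PySem.List.pyGetD_of_nonneg _ _ (by omega)]
        rw [List.getD_eq_getElem?_getD]
        rw [List.getElem?_reverse (by omega)]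
        have : q.length - 1 - (m - 1).toNat = q.length - m.toNat := by omega
        rw [this, List.getElem?_eq_getElem hjlt]
        rfl
      rw [hgd]
      ring
    · rw [dif_neg h]
      have h0 : ((q.length : Int)) / m = 0 :=
        Int.ediv_eq_zero_of_lt (by omega) (by omega)
      simp [groupSum, h0]

theorem sorted_rev_eq (xs : List Int) :
    PySem.List.sorted xs (fun x => x) true = (PySem.List.sorted xs (fun x => x) false).reverse := by
  apply List.Perm.eq_of_pairwise (le := fun a b : Int => b ≤ a)
  · intro a b _ _ h1 h2; omega
  · simpa using PySem.List.sorted_pairwise_rev xs (fun x => x)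
  · rw [List.pairwise_reverse]
    simpa using PySem.List.sorted_pairwise xs (fun x => x)
  · exact ((PySem.List.sorted_perm xs _ true).trans
      (PySem.List.sorted_perm xs _ false).symm).trans (List.reverse_perm _).symm

theorem alt_eq (k m : Int) (hm : 1 ≤ m) (score : List Int) :
    solution_alt k m score = groupSum m (PySem.List.sorted score (fun x => x) false) := by
  unfold solution_alt
  rw [sorted_rev_eq score]
  rw [PySem.List.foldl_add _ (fun i => PySem.List.pyGetD (PySem.List.sorted score (fun x => x) false).reverse i 0 * m) 0]
  rw [PySem.List.pyRange_of_pos _ _ (by omega : (0:Int) < m)]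
  unfold groupSum
  simp only [List.length_reverse, zero_add, List.map_map]
  have hcnt : (if m - 1 < ((PySem.List.sorted score (fun x => x) false).length : Int) then
        ((((PySem.List.sorted score (fun x => x) false).length : Int) - (m - 1) + m - 1) / m).toNat else 0)
      = ((((PySem.List.sorted score (fun x => x) false).length : Int)) / m).toNat := by
    split_ifs with hlt
    · congr 1
      congr 1
      ring
    · have h0 : ((((PySem.List.sorted score (fun x => x) false).length : Int)) / m) = 0 :=
        Int.ediv_eq_zero_of_lt (by omega) (by omega)
      omega
  rw [hcnt]
  apply congrArg List.sum
  apply List.map_congr_left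
  intro j _
  simp only [Function.comp_apply]

-- ===== VERDICT (by name: the statement is the Claim_ definition above) =====
theorem solution_spec : Claim_equal_solution := by
  intro k m score _ hpre
  unfold Pre_solution at hpre
  unfold Spec_solution
  unfold solution
  rw [loop_eq m hpre (PySem.List.sorted score (fun x => x) false).length _ le_rfl
      (by simpa using PySem.List.sorted_pairwise score (fun x => x)) 0]
  rw [zero_add, alt_eq k m hpre score]
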